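-- pv_equiv track=rewrite | github.com/tdan0001/BibleRose-Py | PythonApplication1/BR_Create_Dictionary.py | build_strongs_dictionary
-- ===== SOURCE A (Python) =====
-- from collections import defaultdict, Counter
--
-- def build_strongs_dictionary(verse_strong):
--     """
--     Builds a dictionary of Strong's numbers to words, counting occurrences and considering case-insensitivity.
--     """
--     strongs_dict = defaultdict(lambda: defaultdict(int))  # {strongs_number: {word: count}}
--
--     for verse, strongslist in verse_strong.items():
--         for strongs, word in strongslist:
--             # Normalize word to lowercase for comparison
--             word_lower = word.lower()
--
--             # Increase the frequency count of the word in the dictionary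
--             strongs_dict[strongs][word_lower] += 1
--
--     # Now, for each Strong's number, store the most frequent word (case-sensitive)
--     final_dict = {}
--     for strongs_number, words in strongs_dict.items():
--         # Sort words by frequency (highest first) and take the most common one
--         most_common_word = max(words, key=words.get)
--
--         # Store the most frequent word in its original case
--         final_dict[strongs_number] = most_common_word
--
--      # Sort Strong's numbers by alphabetic prefix and then numerically
--     def sort_key(item):
--         strongs = item[0]
--         alpha_part = ''.join(filter(str.isalpha, strongs))
--         numeric_part = int(''.join(filter(str.isdigit, strongs)))
--         return (alpha_part, numeric_part)
--
--
--     strongs_dict = dict(sorted(strongs_dict.items(), key=sort_key))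
--
--     final_dict = dict(sorted(final_dict.items(), key=sort_key))
--
--     return final_dict
-- ===== SOURCE B (Python) =====
-- def build_strongs_dictionary(verse_strong):
--     # Dict-free brute force: flatten once, dedup keys in first-seen order,
--     # recompute each word's frequency with list.count and a strict-greater scan.
--     words = [(s, w.lower()) for lst in verse_strong.values() for s, w in lst]
--
--     seen = []
--     result = []
--     for s, _ in words:
--         if s in seen:
--             continue
--         seen.append(s)
--         ws = [w for k, w in words if k == s]
--         best, bestc = None, -1
--         for w in ws:
--             c = ws.count(w)
--             if c > bestc:
--                 best, bestc = w, c
--         result.append((s, best))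
--
--     def sort_key(item):
--         strongs = item[0]
--         alpha_part = ''.join(filter(str.isalpha, strongs))
--         numeric_part = int(''.join(filter(str.isdigit, strongs)))
--         return (alpha_part, numeric_part)
--
--     return dict(sorted(result, key=sort_key))
-- ===== Notes on version B (the rewrite author's own statement) =====
-- stated objective: alternative
-- what changed: Replaces A's hash-based counting (nested defaultdict-of-dicts plus a per-key max() pass over inner-dict counts) by a dict-free brute force: flatten the verses once, walk the flat list deduplicating keys in first-seen order, and for each key rescan its word occurrences computing frequencies with list.count in a single strict-greater scan (first word reaching the max wins, matching max's tie-break); the dead re-sorted intermediate dict is dropped and the same sort_key sorts the result.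
import Mathlib
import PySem

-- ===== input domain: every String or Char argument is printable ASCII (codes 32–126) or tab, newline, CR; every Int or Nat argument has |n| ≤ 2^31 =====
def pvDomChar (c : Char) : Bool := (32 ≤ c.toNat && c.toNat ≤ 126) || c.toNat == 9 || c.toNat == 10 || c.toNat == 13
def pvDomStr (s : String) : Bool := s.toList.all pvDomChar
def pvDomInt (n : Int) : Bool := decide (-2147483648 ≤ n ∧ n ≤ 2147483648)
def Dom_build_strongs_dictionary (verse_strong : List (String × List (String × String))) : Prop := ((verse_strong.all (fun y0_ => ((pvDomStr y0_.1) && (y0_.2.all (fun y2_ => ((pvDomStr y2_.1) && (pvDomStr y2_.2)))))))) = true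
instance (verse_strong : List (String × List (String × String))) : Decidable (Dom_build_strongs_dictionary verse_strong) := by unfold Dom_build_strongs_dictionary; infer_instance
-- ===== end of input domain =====

-- B replaces A's hash-based counting (nested defaultdicts + per-key max()) by a dict-free brute force:
-- flatten once, dedup keys in first-seen order, recompute each word's frequency with list.count in a
-- strict-greater scan (alternative decomposition, same result; B is quadratic, not faster).
-- The dict argument arrives as an association list; both ports read it through PySem.Dict.ofList (Python dict construction).

-- ===== PORT A =====
-- sort_key is verbatim identical in Source A and Source B, so both ports share these two helpers.
def pvSortAlpha (s : String) : String := String.ofList (s.toList.filter PySem.Chars.isalpha)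
-- int(''.join(filter(str.isdigit, strongs))); the .getD 0 branch is unreachable under Pre_ (Python raises ValueError there)
def pvSortNum (s : String) : Int := (PySem.Int.ofChars? (s.toList.filter PySem.Chars.isdigit)).getD 0

def build_strongs_dictionary (verse_strong : List (String × List (String × String))) : List (String × String) :=
  let strongs_dict : PySem.Dict String (PySem.Dict String Int) :=
    (PySem.Dict.ofList verse_strong).items.foldl (fun d vp =>
      vp.2.foldl (fun d sw =>
        d.modify sw.1 PySem.Dict.empty (fun inner => inner.modify (PySem.Str.lower sw.2) 0 (· + 1))) d)
      PySem.Dict.empty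
  -- max(words, key=words.get): first key with maximal count; words is never empty, so .getD "" is unreachable
  let final_dict : PySem.Dict String String :=
    strongs_dict.items.foldl (fun fd p =>
      fd.insert p.1 ((PySem.List.max? p.2.keys (fun w => p.2.getD w 0)).getD "")) PySem.Dict.empty
  -- dead re-sorted strongs_dict (A computes it and never uses it)
  let _strongs_sorted := PySem.List.sorted2 strongs_dict.items (fun it => pvSortAlpha it.1) (fun it => pvSortNum it.1)
  PySem.List.sorted2 final_dict.items (fun it => pvSortAlpha it.1) (fun it => pvSortNum it.1)

-- ===== PORT B =====
def build_strongs_dictionary_alt (verse_strong : List (String × List (String × String))) : List (String × String) :=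
  let words : List (String × String) :=
    (PySem.Dict.ofList verse_strong).items.flatMap (fun vp => vp.2.map (fun sw => (sw.1, PySem.Str.lower sw.2)))
  let res : PySem.Set String × List (String × String) :=
    words.foldl (fun st p =>
      if st.1.contains p.1 then st
      else
        let ws := (words.filter (fun q => q.1 == p.1)).map Prod.snd
        -- best stays None only on an empty ws (unreachable), hence the .getD ""
        let best := ws.foldl (fun (b : Option String × Int) w =>
            let c : Int := ws.count w
            if c > b.2 then (some w, c) else b) (none, -1)
        (st.1.add p.1, st.2 ++ [(p.1, best.1.getD "")]))
      (PySem.Set.ofList [], [])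
  PySem.List.sorted2 res.2 (fun it => pvSortAlpha it.1) (fun it => pvSortNum it.1)

-- ===== PRECONDITION & SPEC =====
-- Pre_ excludes exactly the inputs on which the Python raises ValueError: sort_key computes int('') when some
-- strongs string contains no decimal digit. (It checks every listed pair, which is marginally narrower than the
-- raise condition only when a duplicate verse key shadows an earlier list.)
def Pre_build_strongs_dictionary (verse_strong : List (String × List (String × String))) : Prop :=
  (verse_strong.all (fun vp => vp.2.all (fun sw => sw.1.toList.any PySem.Chars.isdigit))) = true
instance (verse_strong : List (String × List (String × String))) : Decidable (Pre_build_strongs_dictionary verse_strong) := by unfold Pre_build_strongs_dictionary; infer_instance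

def pvWitness_build_strongs_dictionary : (List (String × List (String × String))) :=
  [("Gen1:1", [("G25", "Love"), ("G25", "love"), ("H1", "God")])]

def Spec_build_strongs_dictionary (verse_strong : List (String × List (String × String))) (out : List (String × String)) : Prop := out = build_strongs_dictionary_alt verse_strong
instance (verse_strong : List (String × List (String × String))) (out : List (String × String)) : Decidable (Spec_build_strongs_dictionary verse_strong out) := by unfold Spec_build_strongs_dictionary; infer_instance

-- ===== CLAIM (what is proved, stated in full; the proofs are below) =====
def Claim_equal_build_strongs_dictionary : Prop := ∀ (verse_strong : List (String × List (String × String))), Dom_build_strongs_dictionary verse_strong → Pre_build_strongs_dictionary verse_strong → Spec_build_strongs_dictionary verse_strong (build_strongs_dictionary verse_strong)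

-- ===== LEMMAS AND PROOFS =====

lemma pvFind_beq_self {κ : Type} [BEq κ] [LawfulBEq κ] (ks : List κ) (k0 : κ) :
    List.find? (fun k => k == k0) ks = if k0 ∈ ks then some k0 else none := by
  induction ks with
  | nil => simp
  | cons a t ih =>
    by_cases h : a = k0
    · subst h; simp
    · have hb : (a == k0) = false := by simp [h]
      have hne : (k0 = a) = False := by
        simp only [eq_iff_iff, iff_false]; exact fun e => h e.symm
      simp [hb, ih, List.mem_cons, hne]

lemma pvGet_map {κ ν : Type} [BEq κ] [LawfulBEq κ] (ks : List κ) (f : κ → ν) (k0 : κ) :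
    (PySem.Dict.mk (ks.map fun k => (k, f k))).get? k0 = if k0 ∈ ks then some (f k0) else none := by
  simp [PySem.Dict.get?, List.find?_map, Function.comp_def, pvFind_beq_self]

lemma pvInsert_new {κ ν : Type} [BEq κ] [LawfulBEq κ] (ks : List κ) (f : κ → ν) (k0 : κ) (v : ν)
    (h : k0 ∉ ks) :
    ((PySem.Dict.mk (ks.map fun k => (k, f k))).insert k0 v).items
      = ks.map (fun k => (k, f k)) ++ [(k0, v)] := by
  simp [PySem.Dict.insert, h]

lemma pvInsert_mem {κ ν : Type} [BEq κ] [LawfulBEq κ] (ks : List κ) (f : κ → ν) (k0 : κ) (v : ν)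
    (h : k0 ∈ ks) :
    ((PySem.Dict.mk (ks.map fun k => (k, f k))).insert k0 v).items
      = ks.map (fun k => if k == k0 then (k0, v) else (k, f k)) := by
  simp [PySem.Dict.insert, h, List.map_map, Function.comp_def]

lemma pvOfList_nodup {α : Type} [BEq α] [LawfulBEq α] (l : List α) (h : l.Nodup) :
    PySem.Set.ofList l = l := by
  induction l using List.reverseRecOn with
  | nil => rfl
  | append_singleton t a ih =>
    have h2 := List.nodup_append.mp h
    have ha : a ∉ t := fun hm => h2.2.2 a hm a (List.mem_singleton_self a) rfl
    have h1 : PySem.Set.ofList (t ++ [a]) = (PySem.Set.ofList t).add a := by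
      simp [PySem.Set.ofList, List.foldl_append]
    rw [h1, ih h2.1, PySem.Set.add]
    simp [PySem.Set.contains, ha]

lemma pvOfList_append_singleton {α : Type} [BEq α] (l : List α) (x : α) :
    PySem.Set.ofList (l ++ [x]) = (PySem.Set.ofList l).add x := by
  simp [PySem.Set.ofList, List.foldl_append]

lemma pvAdd_mem {α : Type} [BEq α] [LawfulBEq α] (s : PySem.Set α) (x : α) (h : x ∈ s) :
    s.add x = s := by
  simp [PySem.Set.add, PySem.Set.contains, h]

lemma pvAdd_not_mem {α : Type} [BEq α] [LawfulBEq α] (s : PySem.Set α) (x : α) (h : x ∉ s) :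
    s.add x = s ++ [x] := by
  simp [PySem.Set.add, PySem.Set.contains, h]

def pvG {α ν : Type} (g : α → Option ν → ν) (L : List α) : Option ν :=
  L.foldl (fun o x => some (g x o)) none

def pvUpsert {α κ ν : Type} [BEq κ] (keyf : α → κ) (g : α → Option ν → ν) (L : List α) : PySem.Dict κ ν :=
  L.foldl (fun d x => d.insert (keyf x) (g x (d.get? (keyf x)))) PySem.Dict.empty

lemma pvG_append {α ν : Type} (g : α → Option ν → ν) (L : List α) (a : α) :
    pvG g (L ++ [a]) = some (g a (pvG g L)) := by
  simp [pvG, List.foldl_append]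

lemma pvG_isSome {α ν : Type} (g : α → Option ν → ν) (L : List α) (h : L ≠ []) :
    (pvG g L).isSome := by
  induction L using List.reverseRecOn with
  | nil => simp at h
  | append_singleton M a _ => simp [pvG_append]

lemma pvUpsert_items {α κ ν : Type} [BEq κ] [LawfulBEq κ] (keyf : α → κ) (g : α → Option ν → ν)
    (dflt : ν) (L : List α) :
    (pvUpsert keyf g L).items
      = (PySem.Set.ofList (L.map keyf)).map
          (fun k => (k, (pvG g (L.filter (fun x => keyf x == k))).getD dflt)) := by
  induction L using List.reverseRecOn with
  | nil => rfl
  | append_singleton L a ih =>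
    have hstep : pvUpsert keyf g (L ++ [a])
        = (pvUpsert keyf g L).insert (keyf a) (g a ((pvUpsert keyf g L).get? (keyf a))) := by
      simp [pvUpsert, List.foldl_append]
    set ks := PySem.Set.ofList (L.map keyf) with hks
    set f : κ → ν := fun k => (pvG g (L.filter (fun x => keyf x == k))).getD dflt with hf
    have hD : pvUpsert keyf g L = PySem.Dict.mk (ks.map fun k => (k, f k)) :=
      PySem.Dict.ext ih
    rw [hstep, hD]
    rw [List.map_append, List.map_singleton, pvOfList_append_singleton]
    by_cases hk : keyf a ∈ ks
    · -- existing key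
      have hkL : keyf a ∈ L.map keyf := (PySem.Set.mem_ofList _ _).mp hk
      rw [pvAdd_mem _ _ hk]
      rw [pvGet_map _ _ _ , if_pos hk]
      rw [pvInsert_mem ks f (keyf a) _ hk]
      apply List.map_congr_left
      intro k hkmem
      by_cases he : k = keyf a
      · subst he
        rw [if_pos (by simp)]
        have hfil : (L ++ [a]).filter (fun x => keyf x == keyf a) = L.filter (fun x => keyf x == keyf a) ++ [a] := by
          simp [List.filter_append]
        rw [hfil, pvG_append]
        have hne : L.filter (fun x => keyf x == keyf a) ≠ [] := by
          obtain ⟨x, hx, he⟩ := List.mem_map.mp hkL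
          intro hnil
          have : x ∈ L.filter (fun x => keyf x == keyf a) := List.mem_filter.mpr ⟨hx, by simp [he]⟩
          simp [hnil] at this
        obtain ⟨v, hv⟩ := Option.isSome_iff_exists.mp (pvG_isSome g _ hne)
        simp [hf, hv]
      · have hbe : (k == keyf a) = false := by simp [he]
        rw [if_neg (by simp [hbe])]
        have hfil : (L ++ [a]).filter (fun x => keyf x == k) = L.filter (fun x => keyf x == k) := by
          simp [List.filter_append]
          exact fun e => he e.symm
        rw [hfil]
    · -- new key
      have hkL : keyf a ∉ L.map keyf := fun hm => hk ((PySem.Set.mem_ofList _ _).mpr hm)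
      rw [pvAdd_not_mem _ _ hk]
      rw [pvGet_map, if_neg hk]
      rw [pvInsert_new ks f (keyf a) _ hk]
      rw [List.map_append, List.map_singleton]
      congr 1
      · apply List.map_congr_left
        intro k hkmem
        have hne : k ≠ keyf a := fun he => hk (he ▸ hkmem)
        have hbe : (keyf a == k) = false := by
          simp only [beq_eq_false_iff_ne, ne_eq]
          exact fun e => hne e.symm
        have hfil : (L ++ [a]).filter (fun x => keyf x == k) = L.filter (fun x => keyf x == k) := by
          simp [List.filter_append, hbe]
        rw [hfil]
      · have hfil : (L ++ [a]).filter (fun x => keyf x == keyf a) = [a] := by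
          have : L.filter (fun x => keyf x == keyf a) = [] := by
            rw [List.filter_eq_nil_iff]
            intro x hx
            simp only [beq_iff_eq]
            exact fun he => hkL (he ▸ List.mem_map_of_mem hx)
          simp [List.filter_append, this]
        rw [hfil]
        simp [pvG]

-- ===== A-side assembly =====
def pvWs (s : String) (ps : List (String × String)) : List String :=
  (ps.filter (fun p => p.1 == s)).map Prod.snd

def pvGA (p : String × String) (o : Option (PySem.Dict String Int)) : PySem.Dict String Int :=
  (o.getD PySem.Dict.empty).modify p.2 0 (· + 1)

def pvMaxWord (words : PySem.Dict String Int) : String :=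
  (PySem.List.max? words.keys (fun w => words.getD w 0)).getD ""

lemma pvG_gA (M : List (String × String)) (h : M ≠ []) :
    pvG pvGA M = some (PySem.Dict.counter (M.map Prod.snd)) := by
  induction M using List.reverseRecOn with
  | nil => simp at h
  | append_singleton M a ih =>
    rw [pvG_append]
    rcases eq_or_ne M [] with hM | hM
    · subst hM
      simp [pvG, pvGA, PySem.Dict.counter]
    · rw [ih hM]
      simp only [pvGA, Option.getD_some, List.map_append, List.map_singleton,
        PySem.Dict.counter_append_singleton]

-- A's nested strongs_dict, as a fold over the flat pair list, has canonical items
lemma pvA_nested_items (ps : List (String × String)) :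
    (ps.foldl (fun d p =>
        d.modify p.1 PySem.Dict.empty (fun inner => inner.modify p.2 0 (· + 1))) PySem.Dict.empty).items
      = (PySem.Set.ofList (ps.map Prod.fst)).map
          (fun s => (s, PySem.Dict.counter (pvWs s ps))) := by
  have h0 : (ps.foldl (fun d p =>
        d.modify p.1 PySem.Dict.empty (fun inner => inner.modify p.2 0 (· + 1))) PySem.Dict.empty)
      = pvUpsert Prod.fst pvGA ps := rfl
  rw [h0, pvUpsert_items Prod.fst pvGA PySem.Dict.empty ps]
  apply List.map_congr_left
  intro s hs
  have hsm : s ∈ ps.map Prod.fst := (PySem.Set.mem_ofList _ _).mp hs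
  have hne : ps.filter (fun x => x.1 == s) ≠ [] := by
    obtain ⟨x, hx, he⟩ := List.mem_map.mp hsm
    intro hnil
    have : x ∈ ps.filter (fun x => x.1 == s) := List.mem_filter.mpr ⟨hx, by simp [he]⟩
    simp [hnil] at this
  rw [pvG_gA _ hne]
  rfl

-- A's final_dict fold has canonical items
lemma pvA_final_items (ps : List (String × String)) :
    (((PySem.Set.ofList (ps.map Prod.fst)).map
        (fun s => (s, PySem.Dict.counter (pvWs s ps)))).foldl
      (fun fd p => fd.insert p.1 (pvMaxWord p.2)) PySem.Dict.empty).items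
      = (PySem.Set.ofList (ps.map Prod.fst)).map
          (fun s => (s, pvMaxWord (PySem.Dict.counter (pvWs s ps)))) := by
  set ks := PySem.Set.ofList (ps.map Prod.fst) with hks
  have hnd : ks.Nodup := PySem.Set.nodup_ofList _
  set c : String → PySem.Dict String Int := fun s => PySem.Dict.counter (pvWs s ps) with hc
  have h0 : ((ks.map (fun s => (s, c s))).foldl
      (fun fd p => fd.insert p.1 (pvMaxWord p.2)) PySem.Dict.empty)
      = pvUpsert Prod.fst (fun p _ => pvMaxWord p.2) (ks.map (fun s => (s, c s))) := rfl
  rw [h0, pvUpsert_items _ _ "" _]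
  have hkeys : (ks.map (fun s => (s, c s))).map Prod.fst = ks := by
    simp [List.map_map, Function.comp_def]
  rw [hkeys, pvOfList_nodup _ hnd]
  apply List.map_congr_left
  intro s hs
  have hfil : (ks.map (fun s => (s, c s))).filter (fun x => x.1 == s)
      = [(s, c s)] := by
    rw [List.filter_map]
    have : (fun (x : String × PySem.Dict String Int) => x.1 == s) ∘ (fun s => (s, c s))
        = fun k => k == s := rfl
    rw [this, List.filter_beq, List.count_eq_one_of_mem hnd hs, List.replicate_one,
      List.map_singleton]
  rw [hfil]
  rfl

def pvStepA (c : String → Int) (acc : Option String) (x : String) : Option String :=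
  match acc with
  | none => some x
  | some m => if c m < c x then some x else some m

lemma pvMax?_eq_stepA (W : List String) (c : String → Int) :
    PySem.List.max? W c = W.foldl (pvStepA c) none := by
  rw [PySem.List.max?]
  exact PySem.List.foldl_congr_mem _ _ _ _ (fun acc x _ => by cases acc <;> rfl)

lemma pvMaxWord_counter (ws : List String) :
    pvMaxWord (PySem.Dict.counter ws)
      = (PySem.List.max? (PySem.Set.ofList ws) (fun w => (ws.count w : Int))).getD "" := by
  rw [pvMaxWord]
  have hkey : (fun w => (PySem.Dict.counter ws).getD w 0) = fun w => (ws.count w : Int) :=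
    funext (fun w => PySem.Dict.getD_counter ws w)
  rw [PySem.Dict.keys_counter, hkey]

def pvPairs (verse_strong : List (String × List (String × String))) : List (String × String) :=
  (PySem.Dict.ofList verse_strong).items.flatMap (fun vp => vp.2.map (fun sw => (sw.1, PySem.Str.lower sw.2)))

-- the canonical pre-sort association list both ports produce
def pvCanon (verse_strong : List (String × List (String × String))) : List (String × String) :=
  (PySem.Set.ofList ((pvPairs verse_strong).map Prod.fst)).map
    (fun s => (s, (PySem.List.max? (PySem.Set.ofList (pvWs s (pvPairs verse_strong)))
        (fun w => ((pvWs s (pvPairs verse_strong)).count w : Int))).getD ""))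

lemma pvA_presort (vs : List (String × List (String × String))) :
    (((PySem.Dict.ofList vs).items.foldl (fun d vp =>
        vp.2.foldl (fun d sw =>
          d.modify sw.1 PySem.Dict.empty (fun inner => inner.modify (PySem.Str.lower sw.2) 0 (· + 1))) d)
        (PySem.Dict.empty : PySem.Dict String (PySem.Dict String Int))).items.foldl (fun fd p =>
        fd.insert p.1 ((PySem.List.max? p.2.keys (fun w => p.2.getD w 0)).getD ""))
        (PySem.Dict.empty : PySem.Dict String String)).items
      = pvCanon vs := by
  set ps := pvPairs vs with hps
  have hA : (PySem.Dict.ofList vs).items.foldl (fun d vp =>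
      vp.2.foldl (fun d sw =>
        d.modify sw.1 PySem.Dict.empty (fun inner => inner.modify (PySem.Str.lower sw.2) 0 (· + 1))) d)
      (PySem.Dict.empty : PySem.Dict String (PySem.Dict String Int))
      = ps.foldl (fun d p =>
          d.modify p.1 PySem.Dict.empty (fun inner => inner.modify p.2 0 (· + 1)))
          (PySem.Dict.empty : PySem.Dict String (PySem.Dict String Int)) := by
    rw [hps, pvPairs, List.foldl_flatMap]
    simp only [List.foldl_map]
  rw [hA, pvA_nested_items]
  have hff : (fun (fd : PySem.Dict String String) (p : String × PySem.Dict String Int) =>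
      fd.insert p.1 ((PySem.List.max? p.2.keys (fun w => p.2.getD w 0)).getD ""))
      = fun fd p => fd.insert p.1 (pvMaxWord p.2) := rfl
  rw [hff, pvA_final_items]
  rw [pvCanon]
  apply List.map_congr_left
  intro s _
  rw [pvMaxWord_counter]

-- ===== B-side assembly =====

-- B's inner scan, carrying only the current best word (the count component is determined by it)
def pvGScan (f : String → Int) (a : Option String) (w : String) : Option String :=
  match a with
  | none => some w
  | some m => if f m < f w then some w else some m

def pvLift (f : String → Int) (o : Option String) : Option String × Int :=
  match o with
  | none => (none, -1)
  | some m => (some m, f m)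

-- B's (best, bestc) pair fold is the lift of the Option-only fold (counts are ≥ 0 > -1)
lemma pvScan_lift (f : String → Int) (hf : ∀ w, 0 ≤ f w) :
    ∀ (L : List String) (a : Option String),
      L.foldl (fun b w => if f w > b.2 then (some w, f w) else b) (pvLift f a)
        = pvLift f (L.foldl (pvGScan f) a) := by
  intro L
  induction L with
  | nil => intro a; rfl
  | cons w L ih =>
    intro a
    rw [List.foldl_cons, List.foldl_cons, ← ih]
    congr 1
    cases a with
    | none =>
      have : f w > (-1 : Int) := lt_of_lt_of_le (by norm_num) (hf w)
      simp [pvLift, pvGScan, this]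
    | some m =>
      simp only [pvLift, pvGScan]
      by_cases h : f m < f w
      · simp [h, gt_iff_lt]
      · simp [h, gt_iff_lt]

-- after folding L the accumulated best dominates every element of L
lemma pvGScan_dominates (f : String → Int) :
    ∀ (L : List String) (a : Option String) (w : String), w ∈ L →
      ∃ m, L.foldl (pvGScan f) a = some m ∧ f w ≤ f m := by
  intro L
  induction L with
  | nil => intro a w h; simp at h
  | cons x L ih =>
    intro a w hw
    rw [List.foldl_cons]
    rcases List.mem_cons.mp hw with he | hm
    · subst he
      -- f-value of the accumulator never decreases along the fold
      have mono : ∀ (L : List String) (m : String),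
          ∃ m', L.foldl (pvGScan f) (some m) = some m' ∧ f m ≤ f m' := by
        intro L
        induction L with
        | nil => intro m; exact ⟨m, rfl, le_refl _⟩
        | cons y L ihy =>
          intro m
          rw [List.foldl_cons]
          by_cases h : f m < f y
          · obtain ⟨m', h1, h2⟩ := ihy y
            exact ⟨m', by simpa [pvGScan, h] using h1, le_trans (le_of_lt h) h2⟩
          · obtain ⟨m', h1, h2⟩ := ihy m
            exact ⟨m', by simpa [pvGScan, h] using h1, h2⟩
      cases a with
      | none => simpa [pvGScan] using mono L w
      | some m =>
        by_cases h : f m < f w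
        · simpa [pvGScan, h] using mono L w
        · obtain ⟨m', h1, h2⟩ := mono L m
          exact ⟨m', by simpa [pvGScan, h] using h1, le_trans (le_of_not_gt h) h2⟩
    · exact ih _ w hm
  
-- duplicates are no-ops: the scan over a list equals the scan over its set of distinct elements
lemma pvGScan_dedup (f : String → Int) (ws : List String) :
    ws.foldl (pvGScan f) none = (PySem.Set.ofList ws).foldl (pvGScan f) none := by
  induction ws using List.reverseRecOn with
  | nil => rfl
  | append_singleton L x ih =>
    rw [List.foldl_append, List.foldl_cons, List.foldl_nil, ih, pvOfList_append_singleton]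
    by_cases h : x ∈ PySem.Set.ofList L
    · rw [pvAdd_mem _ _ h]
      obtain ⟨m, h1, h2⟩ := pvGScan_dominates f (PySem.Set.ofList L) none x h
      rw [h1]
      simp [pvGScan, not_lt.mpr h2]
    · rw [pvAdd_not_mem _ _ h, List.foldl_append, List.foldl_cons, List.foldl_nil]

-- B's inner scan equals Python's max(..., key=...) over the distinct words
lemma pvScan_eq_max (ws : List String) :
    (ws.foldl (fun (b : Option String × Int) w =>
        if ((ws.count w : Int)) > b.2 then (some w, (ws.count w : Int)) else b) (none, -1)).1
      = PySem.List.max? (PySem.Set.ofList ws) (fun w => (ws.count w : Int)) := by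
  set f : String → Int := fun w => (ws.count w : Int) with hfdef
  have hf : ∀ w, 0 ≤ f w := fun w => Int.natCast_nonneg _
  have h0 : (none, (-1 : Int)) = pvLift f none := rfl
  rw [h0, pvScan_lift f hf ws none, pvGScan_dedup f ws,
    pvMax?_eq_stepA (PySem.Set.ofList ws) f]
  have hsame : (PySem.Set.ofList ws).foldl (pvGScan f) none
      = (PySem.Set.ofList ws).foldl (pvStepA f) none :=
    PySem.List.foldl_congr_mem _ _ _ _ (fun a x _ => by cases a <;> rfl)
  rw [hsame]
  cases (PySem.Set.ofList ws).foldl (pvStepA f) none <;> rfl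

-- B's outer loop builds exactly the dedup-keys map
lemma pvB_outer (bestf : String → String) (L : List (String × String)) :
    L.foldl (fun (st : PySem.Set String × List (String × String)) p =>
        if st.1.contains p.1 then st
        else (st.1.add p.1, st.2 ++ [(p.1, bestf p.1)]))
      (PySem.Set.ofList [], [])
      = (PySem.Set.ofList (L.map Prod.fst),
         (PySem.Set.ofList (L.map Prod.fst)).map (fun s => (s, bestf s))) := by
  induction L using List.reverseRecOn with
  | nil => rfl
  | append_singleton L p ih =>
    rw [List.foldl_append, List.foldl_cons, List.foldl_nil, ih,
      List.map_append, List.map_singleton, pvOfList_append_singleton]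
    by_cases h : p.1 ∈ PySem.Set.ofList (L.map Prod.fst)
    · have hc : (PySem.Set.ofList (L.map Prod.fst)).contains p.1 = true :=
        (PySem.Set.contains_iff _ _).mpr h
      rw [pvAdd_mem _ _ h, if_pos hc]
    · have hc : ¬ ((PySem.Set.ofList (L.map Prod.fst)).contains p.1 = true) := by
        rw [PySem.Set.contains_iff]; exact h
      rw [pvAdd_not_mem _ _ h, if_neg hc, List.map_append, List.map_singleton]

lemma pvB_presort (vs : List (String × List (String × String))) :
    ((pvPairs vs).foldl (fun (st : PySem.Set String × List (String × String)) p =>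
        if st.1.contains p.1 then st
        else
          let ws := ((pvPairs vs).filter (fun q => q.1 == p.1)).map Prod.snd
          let best := ws.foldl (fun (b : Option String × Int) w =>
              let c : Int := ws.count w
              if c > b.2 then (some w, c) else b) (none, -1)
          (st.1.add p.1, st.2 ++ [(p.1, best.1.getD "")]))
      (PySem.Set.ofList [], [])).2
      = pvCanon vs := by
  set ps := pvPairs vs with hps
  set bestf : String → String := fun s =>
    ((pvWs s ps).foldl (fun (b : Option String × Int) w =>
        if ((pvWs s ps).count w : Int) > b.2 then (some w, ((pvWs s ps).count w : Int)) else b)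
      (none, -1)).1.getD "" with hbestf
  have hstep : (fun (st : PySem.Set String × List (String × String)) p =>
        if st.1.contains p.1 then st
        else
          let ws := (ps.filter (fun q => q.1 == p.1)).map Prod.snd
          let best := ws.foldl (fun (b : Option String × Int) w =>
              let c : Int := ws.count w
              if c > b.2 then (some w, c) else b) (none, -1)
          (st.1.add p.1, st.2 ++ [(p.1, best.1.getD "")]))
      = (fun (st : PySem.Set String × List (String × String)) (p : String × String) =>
          if st.1.contains p.1 then st
          else (st.1.add p.1, st.2 ++ [(p.1, bestf p.1)])) := by
    funext st p
    rfl
  rw [hstep, pvB_outer bestf ps, pvCanon]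
  apply List.map_congr_left
  intro s _
  rw [hbestf]
  simp only
  rw [pvScan_eq_max (pvWs s ps)]

-- ===== VERDICT (by name: the statement is the Claim_ definition above) =====
theorem build_strongs_dictionary_spec : Claim_equal_build_strongs_dictionary := by
  intro vs _ _
  unfold Spec_build_strongs_dictionary build_strongs_dictionary build_strongs_dictionary_alt
  dsimp only
  rw [show ((PySem.Dict.ofList vs).items.flatMap
      (fun vp => vp.2.map (fun sw => (sw.1, PySem.Str.lower sw.2)))) = pvPairs vs from rfl]
  rw [pvA_presort, pvB_presort]
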